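-- pv_equiv track=rewrite | github.com/ermiyastesfaye-lab/A2SV_CP | 07-Apr-2025/Christmas Spruce 327854.py | solve
-- ===== SOURCE A (Python) =====
-- from collections import Counter, defaultdict, deque
--
-- def solve(lst):
--     cnt = defaultdict(int)
--     for j in range(1, len(lst)):
--         if j != len(lst)-1:
--             for k in range(j+1, len(lst)):
--                 if lst[k][0] == lst[j][1]:
--                     if lst[j][0] not in cnt:
--                         cnt[lst[j][0]] = 0
--                     break
--             else:
--                 cnt[lst[j][0]]+=1
--         if j == len(lst)-1:
--             cnt[lst[j][0]]+=1
--     val = list(cnt.values())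
--     for m in val:
--         if m < 3:
--             return "No"
--     return "Yes"
-- ===== SOURCE B (Python) =====
-- def solve(lst):
--     n = len(lst)
--     cnt = {}
--     suffix = {}
--     for j in range(n - 1, 0, -1):
--         c = lst[j][0]
--         if j == n - 1:
--             cnt[c] = cnt.get(c, 0) + 1
--         elif suffix.get(lst[j][1], 0) > 0:
--             cnt.setdefault(c, 0)
--         else:
--             cnt[c] = cnt.get(c, 0) + 1
--         suffix[c] = suffix.get(c, 0) + 1
--     return "No" if any(v < 3 for v in cnt.values()) else "Yes"
-- ===== Notes on version B (the rewrite author's own statement) =====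
-- stated objective: faster
-- what changed: Replaced the O(n^2) inner scan (for each j, search all k>j for a string starting with lst[j][1]) by a single backward pass that maintains a suffix counter of first characters, making each existence test O(1).
import Mathlib
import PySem

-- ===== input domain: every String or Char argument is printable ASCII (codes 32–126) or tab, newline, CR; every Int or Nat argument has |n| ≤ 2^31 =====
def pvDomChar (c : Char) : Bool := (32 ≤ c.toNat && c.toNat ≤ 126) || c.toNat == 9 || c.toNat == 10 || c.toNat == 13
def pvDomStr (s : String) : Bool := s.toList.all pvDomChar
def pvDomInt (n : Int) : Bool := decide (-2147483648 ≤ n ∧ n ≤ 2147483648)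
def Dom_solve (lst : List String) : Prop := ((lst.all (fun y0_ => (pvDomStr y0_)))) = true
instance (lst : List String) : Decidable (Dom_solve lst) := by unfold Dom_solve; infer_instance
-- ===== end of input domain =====

-- B replaces A's quadratic inner scan by one backward pass with a suffix counter of
-- first characters (O(1) existence test per position); same return value under Pre_.

-- shared helpers: s[0] and s[1] (total forms; Pre_ keeps the index in range)
def pvCh0 (s : String) : Char := (PySem.Str.pyGet? s 0).getD ' '
def pvCh1 (s : String) : Char := (PySem.Str.pyGet? s 1).getD ' '

-- ===== PORT A =====
-- inner 'for k in range(j+1, len(lst)): … break / else:' loop of A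
def solveInner (lst : List String) (cj tj : Char) (ks : List Int)
    (cnt : PySem.Dict Char Int) : PySem.Dict Char Int :=
  match ks with
  | [] => cnt.modify cj 0 (· + 1)
  | k :: ks' =>
    if pvCh0 (PySem.List.pyGetD lst k "") = tj then
      if cnt.contains cj then cnt else cnt.insert cj 0
    else solveInner lst cj tj ks' cnt

def solve (lst : List String) : String :=
  let n : Int := lst.length
  let cnt := (PySem.List.pyRange 1 n 1).foldl
    (fun (cnt : PySem.Dict Char Int) j =>
      let s := PySem.List.pyGetD lst j ""
      let cnt := if j ≠ n - 1 then
          solveInner lst (pvCh0 s) (pvCh1 s) (PySem.List.pyRange (j+1) n 1) cnt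
        else cnt
      if j = n - 1 then cnt.modify (pvCh0 s) 0 (· + 1) else cnt)
    PySem.Dict.empty
  if cnt.values.any (fun m => m < 3) then "No" else "Yes"

-- ===== PORT B =====
def solve_alt (lst : List String) : String :=
  let n : Int := lst.length
  let st := (PySem.List.pyRange (n - 1) 0 (-1)).foldl
    (fun (st : PySem.Dict Char Int × PySem.Dict Char Int) j =>
      let cnt := st.1
      let suffix := st.2
      let s := PySem.List.pyGetD lst j ""
      let c := pvCh0 s
      let cnt :=
        if j = n - 1 then cnt.insert c (cnt.getD c 0 + 1)
        else if suffix.getD (pvCh1 s) 0 > 0 then cnt.setdefault c 0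
        else cnt.insert c (cnt.getD c 0 + 1)
      (cnt, suffix.insert c (suffix.getD c 0 + 1)))
    (PySem.Dict.empty, PySem.Dict.empty)
  if st.1.values.any (fun m => m < 3) then "No" else "Yes"

-- ===== PRECONDITION & SPEC =====
-- Pre_ excludes exactly the inputs where Python A raises IndexError: a string at a
-- middle position (1 ≤ j < len-1) shorter than 2, or the last string (len ≥ 2) empty.
def Pre_solve (lst : List String) : Prop :=
  ∀ p ∈ lst.zipIdx, (1 ≤ p.2 → 1 ≤ PySem.Str.len p.1) ∧
    (1 ≤ p.2 ∧ p.2 + 1 < lst.length → 2 ≤ PySem.Str.len p.1)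
instance (lst : List String) : Decidable (Pre_solve lst) := by unfold Pre_solve; infer_instance
def pvWitness_solve : List String := ["x", "ab", "ac", "ad", "b"]
def Spec_solve (lst : List String) (out : String) : Prop := out = solve_alt lst
instance (lst : List String) (out : String) : Decidable (Spec_solve lst out) := by unfold Spec_solve; infer_instance

-- ===== CLAIM (what is proved, stated in full; the proofs are below) =====
def Claim_equal_solve : Prop := ∀ (lst : List String), Dom_solve lst → Pre_solve lst → Spec_solve lst (solve lst)

-- ===== LEMMAS AND PROOFS =====

-- spec-side abbreviations: first/second char at position j, match existence, contribution
def pvC (lst : List String) (j : Int) : Char := pvCh0 (PySem.List.pyGetD lst j "")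
def pvT (lst : List String) (j : Int) : Char := pvCh1 (PySem.List.pyGetD lst j "")
def pvMatch (lst : List String) (j : Int) : Bool :=
  (PySem.List.pyRange (j+1) lst.length 1).any (fun k => pvC lst k == pvT lst j)
def pvGood (lst : List String) (j : Int) : Bool :=
  (j == (lst.length : Int) - 1) || !(pvMatch lst j)
def pvF (lst : List String) (a b : Int) (x : Char) : Int :=
  ((PySem.List.pyRange a b 1).countP (fun j => pvGood lst j && (pvC lst j == x)) : Int)

-- invariant of the count dictionary over the index interval [a, b)
def InvCnt (lst : List String) (a b : Int) (d : PySem.Dict Char Int) : Prop :=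
  d.keys.Nodup ∧
  (∀ x, d.contains x = (PySem.List.pyRange a b 1).any (fun j => pvC lst j == x)) ∧
  (∀ x, d.getD x 0 = pvF lst a b x)

-- invariant of B's suffix counter over [a, b)
def InvSuf (lst : List String) (a b : Int) (d : PySem.Dict Char Int) : Prop :=
  ∀ x, d.getD x 0 = ((PySem.List.pyRange a b 1).countP (fun k => pvC lst k == x) : Int)

theorem solveInner_char (lst : List String) (cj tj : Char) (ks : List Int)
    (d : PySem.Dict Char Int) :
    solveInner lst cj tj ks d =
      if ks.any (fun k => pvC lst k == tj) then
        (if d.contains cj then d else d.insert cj 0)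
      else d.modify cj 0 (· + 1) := by
  induction ks with
  | nil => simp [solveInner]
  | cons k ks' ih =>
    simp only [solveInner, List.any_cons, pvC]
    by_cases h : pvCh0 (PySem.List.pyGetD lst k "") = tj
    · simp [h]
    · simp [h, ih, pvC]


-- named forms of the two fold bodies (defeq to the lambdas in the ports; proof-side only)
def stepA (lst : List String) : PySem.Dict Char Int → Int → PySem.Dict Char Int :=
  fun cnt j =>
    if j = (lst.length : Int) - 1 then
      (if j ≠ (lst.length : Int) - 1 then
          solveInner lst (pvCh0 (PySem.List.pyGetD lst j "")) (pvCh1 (PySem.List.pyGetD lst j ""))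
            (PySem.List.pyRange (j+1) (lst.length : Int) 1) cnt
        else cnt).modify (pvCh0 (PySem.List.pyGetD lst j "")) 0 (· + 1)
    else
      (if j ≠ (lst.length : Int) - 1 then
          solveInner lst (pvCh0 (PySem.List.pyGetD lst j "")) (pvCh1 (PySem.List.pyGetD lst j ""))
            (PySem.List.pyRange (j+1) (lst.length : Int) 1) cnt
        else cnt)

def stepB (lst : List String) :
    PySem.Dict Char Int × PySem.Dict Char Int → Int → PySem.Dict Char Int × PySem.Dict Char Int :=
  fun st j =>
    ((if j = (lst.length : Int) - 1 then
        st.1.insert (pvCh0 (PySem.List.pyGetD lst j "")) (st.1.getD (pvCh0 (PySem.List.pyGetD lst j "")) 0 + 1)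
      else if st.2.getD (pvCh1 (PySem.List.pyGetD lst j "")) 0 > 0 then
        st.1.setdefault (pvCh0 (PySem.List.pyGetD lst j "")) 0
      else
        st.1.insert (pvCh0 (PySem.List.pyGetD lst j "")) (st.1.getD (pvCh0 (PySem.List.pyGetD lst j "")) 0 + 1)),
     st.2.insert (pvCh0 (PySem.List.pyGetD lst j "")) (st.2.getD (pvCh0 (PySem.List.pyGetD lst j "")) 0 + 1))

theorem solve_eq (lst : List String) :
    solve lst =
      (if ((PySem.List.pyRange 1 (lst.length : Int) 1).foldl (stepA lst)
          PySem.Dict.empty).values.any (fun m => m < 3) then "No" else "Yes") := rfl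

theorem solve_alt_eq (lst : List String) :
    solve_alt lst =
      (if ((PySem.List.pyRange ((lst.length : Int) - 1) 0 (-1)).foldl (stepB lst)
          (PySem.Dict.empty, PySem.Dict.empty)).1.values.any (fun m => m < 3)
        then "No" else "Yes") := rfl

theorem InvCnt_empty (lst : List String) {a b : Int} (h : b ≤ a) :
    InvCnt lst a b PySem.Dict.empty := by
  refine ⟨by simp, fun x => ?_, fun x => ?_⟩ <;>
    simp [PySem.List.pyRange_one_eq_nil h, pvF]

-- generic single-index extension of InvCnt, right end ([a,m) to [a,m+1)) and left end
theorem InvCnt_extendR (lst : List String) (a m : Int) (d d' : PySem.Dict Char Int)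
    (h1 : a ≤ m) (hd : InvCnt lst a m d)
    (hnd' : d'.keys.Nodup)
    (hcon' : ∀ x, d'.contains x = ((pvC lst m == x) || d.contains x))
    (hget' : ∀ x, d'.getD x 0 = d.getD x 0 + (if pvGood lst m && (pvC lst m == x) then 1 else 0)) :
    InvCnt lst a (m+1) d' := by
  obtain ⟨hnd, hcon, hget⟩ := hd
  refine ⟨hnd', fun x => ?_, fun x => ?_⟩
  · rw [hcon' x, PySem.List.pyRange_one_succ_right h1, List.any_append, hcon x]
    simp [Bool.or_comm]
  · rw [hget' x, hget x]
    unfold pvF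
    rw [PySem.List.pyRange_one_succ_right h1, List.countP_append]
    push_cast
    by_cases hg : (pvGood lst m && (pvC lst m == x)) = true <;>
      simp [hg]

theorem InvCnt_extendL (lst : List String) (a b : Int) (d d' : PySem.Dict Char Int)
    (h1 : a < b) (hd : InvCnt lst (a+1) b d)
    (hnd' : d'.keys.Nodup)
    (hcon' : ∀ x, d'.contains x = ((pvC lst a == x) || d.contains x))
    (hget' : ∀ x, d'.getD x 0 = d.getD x 0 + (if pvGood lst a && (pvC lst a == x) then 1 else 0)) :
    InvCnt lst a b d' := by
  obtain ⟨hnd, hcon, hget⟩ := hd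
  refine ⟨hnd', fun x => ?_, fun x => ?_⟩
  · rw [hcon' x, PySem.List.pyRange_one_cons h1, List.any_cons, hcon x]
  · rw [hget' x, hget x]
    unfold pvF
    rw [PySem.List.pyRange_one_cons h1, List.countP_cons]
    push_cast
    by_cases hg : (pvGood lst a && (pvC lst a == x)) = true <;>
      simp [hg]

-- dict facts for the two kinds of update both programs perform
theorem dict_inc_nodup (d : PySem.Dict Char Int) (c : Char) (h : d.keys.Nodup) :
    (d.insert c (d.getD c 0 + 1)).keys.Nodup := PySem.Dict.nodup_keys_insert d c _ h

theorem dict_inc_contains (d : PySem.Dict Char Int) (c x : Char) :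
    (d.insert c (d.getD c 0 + 1)).contains x = ((c == x) || d.contains x) := by
  rw [PySem.Dict.contains_insert]
  by_cases h : c = x
  · subst h; simp
  · have h' : x ≠ c := fun e => h e.symm
    rw [beq_eq_false_iff_ne.mpr h', beq_eq_false_iff_ne.mpr h]

theorem dict_inc_getD (d : PySem.Dict Char Int) (c x : Char) :
    (d.insert c (d.getD c 0 + 1)).getD x 0 = d.getD x 0 + (if true && (c == x) then 1 else 0) := by
  rw [PySem.Dict.getD_insert]
  by_cases h : c = x
  · subst h; simp
  · have h' : x ≠ c := fun e => h e.symm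
    simp [h, h']

theorem setdefault_eq_touch (d : PySem.Dict Char Int) (c : Char) :
    d.setdefault c 0 = if d.contains c then d else d.insert c 0 := by
  by_cases h : d.contains c = true
  · rw [PySem.Dict.setdefault_of_contains d 0 h]; simp [h]
  · rw [PySem.Dict.setdefault_of_not_contains d 0 (by simpa using h)]; simp [h]

theorem dict_touch_nodup (d : PySem.Dict Char Int) (c : Char) (h : d.keys.Nodup) :
    (if d.contains c then d else d.insert c 0).keys.Nodup := by
  by_cases hc : d.contains c = true <;>
    simp [hc, h, PySem.Dict.nodup_keys_insert d c 0 h]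

theorem dict_touch_contains (d : PySem.Dict Char Int) (c x : Char) :
    (if d.contains c then d else d.insert c 0).contains x = ((c == x) || d.contains x) := by
  by_cases hc : d.contains c = true
  · by_cases h : c = x
    · subst h; simp [hc]
    · simp [hc, h]
  · have hc' : d.contains c = false := by simpa using hc
    rw [if_neg (by simp [hc']), PySem.Dict.contains_insert]
    by_cases h : c = x
    · subst h; simp
    · have h' : x ≠ c := fun e => h e.symm
      rw [beq_eq_false_iff_ne.mpr h', beq_eq_false_iff_ne.mpr h]

theorem dict_touch_getD (d : PySem.Dict Char Int) (c x : Char) :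
    (if d.contains c then d else d.insert c 0).getD x 0 =
      d.getD x 0 + (if false && (c == x) then 1 else 0) := by
  by_cases hc : d.contains c = true
  · simp [hc]
  · have hc' : d.contains c = false := by simpa using hc
    rw [if_neg (by simp [hc']), PySem.Dict.getD_insert]
    by_cases h : x = c
    · subst h; rw [PySem.Dict.getD_of_not_contains d 0 hc']; simp
    · simp [h]

-- the suffix-count test of B decides exactly A's inner-loop match existence
theorem suf_test (lst : List String) (a : Int) (suf : PySem.Dict Char Int)
    (hs : InvSuf lst (a+1) (lst.length : Int) suf) :
    (suf.getD (pvT lst a) 0 > 0) ↔ pvMatch lst a = true := by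
  rw [hs (pvT lst a)]
  unfold pvMatch
  rw [List.any_eq_true]
  constructor
  · intro h
    have h' : 0 < (PySem.List.pyRange (a+1) (lst.length : Int) 1).countP
        (fun k => pvC lst k == pvT lst a) := by exact_mod_cast h
    exact List.countP_pos_iff.mp h'
  · intro h
    have h' : 0 < (PySem.List.pyRange (a+1) (lst.length : Int) 1).countP
        (fun k => pvC lst k == pvT lst a) := List.countP_pos_iff.mpr h
    exact_mod_cast h'

-- one step of A preserves the invariant
theorem stepA_inv (lst : List String) (m : Int) (d : PySem.Dict Char Int)
    (h1 : 1 ≤ m) (_h2 : m < (lst.length : Int)) (hd : InvCnt lst 1 m d) :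
    InvCnt lst 1 (m+1) (stepA lst d m) := by
  unfold stepA
  have hcc : pvCh0 (PySem.List.pyGetD lst m "") = pvC lst m := rfl
  have htt : pvCh1 (PySem.List.pyGetD lst m "") = pvT lst m := rfl
  by_cases hm : m = (lst.length : Int) - 1
  · rw [if_pos hm, if_neg (not_not_intro hm), hcc]
    have hmod : PySem.Dict.modify d (pvC lst m) 0 (· + 1) =
        d.insert (pvC lst m) (d.getD (pvC lst m) 0 + 1) := rfl
    rw [hmod]
    have hg : pvGood lst m = true := by simp [pvGood, hm]
    refine InvCnt_extendR lst 1 m d _ h1 hd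
      (dict_inc_nodup d _ hd.1) (dict_inc_contains d _) (fun x => ?_)
    rw [dict_inc_getD d _ x, hg]
  · rw [if_neg hm, if_pos hm, hcc, htt, solveInner_char]
    have hrange : (PySem.List.pyRange (m+1) (lst.length : Int) 1).any
        (fun k => pvC lst k == pvT lst m) = pvMatch lst m := rfl
    rw [hrange]
    by_cases hmt : pvMatch lst m = true
    · rw [if_pos hmt]
      have hg : pvGood lst m = false := by
        simp only [pvGood, hmt, Bool.not_true, Bool.or_false]
        simpa using hm
      refine InvCnt_extendR lst 1 m d _ h1 hd
        (dict_touch_nodup d _ hd.1) (dict_touch_contains d _) (fun x => ?_)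
      rw [dict_touch_getD d _ x, hg]
    · rw [if_neg hmt]
      have hmod : PySem.Dict.modify d (pvC lst m) 0 (· + 1) =
          d.insert (pvC lst m) (d.getD (pvC lst m) 0 + 1) := rfl
      rw [hmod]
      have hg : pvGood lst m = true := by
        simp only [Bool.not_eq_true] at hmt
        simp [pvGood, hmt]
      refine InvCnt_extendR lst 1 m d _ h1 hd
        (dict_inc_nodup d _ hd.1) (dict_inc_contains d _) (fun x => ?_)
      rw [dict_inc_getD d _ x, hg]

-- A's whole loop establishes the invariant on [1, 1+k)
theorem A_loop (lst : List String) (k : Nat) (hk : 1 + (k : Int) ≤ (lst.length : Int)) :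
    InvCnt lst 1 (1 + (k : Int))
      ((PySem.List.pyRange 1 (1 + (k : Int)) 1).foldl (stepA lst) PySem.Dict.empty) := by
  induction k with
  | zero => simpa using InvCnt_empty lst (le_refl 1)
  | succ k ih =>
    push_cast at hk ⊢
    have hd : (1 : Int) + ((k : Int) + 1) = (1 + (k : Int)) + 1 := by ring
    rw [hd, PySem.List.pyRange_one_succ_right (by omega), List.foldl_append]
    have ih' := ih (by omega)
    simp only [List.foldl_cons, List.foldl_nil]
    exact stepA_inv lst (1 + (k : Int)) _ (by omega) (by omega) ih'

-- one step of B preserves both invariants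
theorem stepB_inv (lst : List String) (a : Int)
    (st : PySem.Dict Char Int × PySem.Dict Char Int)
    (ha : a < (lst.length : Int))
    (hc : InvCnt lst (a+1) (lst.length : Int) st.1)
    (hs : InvSuf lst (a+1) (lst.length : Int) st.2) :
    InvCnt lst a (lst.length : Int) (stepB lst st a).1 ∧
      InvSuf lst a (lst.length : Int) (stepB lst st a).2 := by
  unfold stepB
  have hcc : pvCh0 (PySem.List.pyGetD lst a "") = pvC lst a := rfl
  have htt : pvCh1 (PySem.List.pyGetD lst a "") = pvT lst a := rfl
  simp only [hcc, htt]
  constructor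
  · by_cases hm : a = (lst.length : Int) - 1
    · rw [if_pos hm]
      have hg : pvGood lst a = true := by simp [pvGood, hm]
      refine InvCnt_extendL lst a _ st.1 _ ha hc
        (dict_inc_nodup st.1 _ hc.1) (dict_inc_contains st.1 _) (fun x => ?_)
      rw [dict_inc_getD st.1 _ x, hg]
    · rw [if_neg hm]
      by_cases hmt : st.2.getD (pvT lst a) 0 > 0
      · rw [if_pos hmt, setdefault_eq_touch]
        have hmm : pvMatch lst a = true := (suf_test lst a st.2 hs).mp hmt
        have hg : pvGood lst a = false := by
          simp only [pvGood, hmm, Bool.not_true, Bool.or_false]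
          simpa using hm
        refine InvCnt_extendL lst a _ st.1 _ ha hc
          (dict_touch_nodup st.1 _ hc.1) (dict_touch_contains st.1 _) (fun x => ?_)
        rw [dict_touch_getD st.1 _ x, hg]
      · rw [if_neg hmt]
        have hmm : pvMatch lst a = false := by
          rcases h : pvMatch lst a
          · rfl
          · exact absurd ((suf_test lst a st.2 hs).mpr h) hmt
        have hg : pvGood lst a = true := by simp [pvGood, hmm]
        refine InvCnt_extendL lst a _ st.1 _ ha hc
          (dict_inc_nodup st.1 _ hc.1) (dict_inc_contains st.1 _) (fun x => ?_)
        rw [dict_inc_getD st.1 _ x, hg]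
  · intro x
    rw [dict_inc_getD st.2 _ x, hs x, PySem.List.pyRange_one_cons ha, List.countP_cons]
    push_cast
    by_cases h : (pvC lst a == x) = true <;> simp [h]

-- B's whole countdown loop
theorem B_loop (lst : List String) (k : Nat)
    (st : PySem.Dict Char Int × PySem.Dict Char Int)
    (hk : (k : Int) ≤ (lst.length : Int) - 1)
    (hc : InvCnt lst ((k : Int) + 1) (lst.length : Int) st.1)
    (hs : InvSuf lst ((k : Int) + 1) (lst.length : Int) st.2) :
    InvCnt lst 1 (lst.length : Int)
      ((PySem.List.pyRange (k : Int) 0 (-1)).foldl (stepB lst) st).1 := by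
  induction k generalizing st with
  | zero => simpa [PySem.List.pyRange_neg_one_eq_nil (le_refl (0:Int))] using hc
  | succ k ih =>
    push_cast at hk hc hs ⊢
    rw [PySem.List.pyRange_neg_one_cons (by omega : (0:Int) < (k : Int) + 1)]
    simp only [List.foldl_cons]
    have hlt : (k : Int) + 1 < (lst.length : Int) := by omega
    obtain ⟨hc', hs'⟩ := stepB_inv lst ((k : Int) + 1) st hlt
      hc hs
    have he : (k : Int) + 1 - 1 = (k : Int) := by ring
    rw [he]
    exact ih (stepB lst st ((k : Int) + 1)) (by omega) hc' hs'

-- the final aggregation depends only on the invariant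
theorem values_any_eq (lst : List String) (d d' : PySem.Dict Char Int)
    (hd : InvCnt lst 1 (lst.length : Int) d) (hd' : InvCnt lst 1 (lst.length : Int) d') :
    d.values.any (fun m => m < 3) = d'.values.any (fun m => m < 3) := by
  have key : ∀ (e : PySem.Dict Char Int), InvCnt lst 1 (lst.length : Int) e →
      (e.values.any (fun m => m < 3) = true ↔
        ∃ x, (PySem.List.pyRange 1 (lst.length : Int) 1).any (fun j => pvC lst j == x) = true ∧
          pvF lst 1 (lst.length : Int) x < 3) := by
    intro e he
    obtain ⟨hnd, hcon, hget⟩ := he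
    rw [PySem.Dict.values_eq_map_keys e hnd 0, List.any_map, List.any_eq_true]
    constructor
    · rintro ⟨x, hx, hp⟩
      refine ⟨x, ?_, ?_⟩
      · rw [← hcon x]; exact (PySem.Dict.contains_iff_mem_keys e x).mpr hx
      · rw [← hget x]; simpa using hp
    · rintro ⟨x, hx, hp⟩
      refine ⟨x, ?_, ?_⟩
      · exact (PySem.Dict.contains_iff_mem_keys e x).mp (by rw [hcon x]; exact hx)
      · simpa [hget x] using hp
  cases h1 : d.values.any (fun m => m < 3) <;> cases h2' : d'.values.any (fun m => m < 3)
  · rfl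
  · exact absurd ((key d hd).mpr ((key d' hd').mp h2')) (by simp [h1])
  · exact absurd ((key d' hd').mpr ((key d hd).mp h1)) (by simp [h2'])
  · rfl

-- ===== VERDICT (by name: the statement is the Claim_ definition above) =====
theorem solve_spec : Claim_equal_solve := by
  intro lst _ _
  unfold Spec_solve
  rw [solve_eq, solve_alt_eq]
  have hA : InvCnt lst 1 (lst.length : Int)
      ((PySem.List.pyRange 1 (lst.length : Int) 1).foldl (stepA lst) PySem.Dict.empty) := by
    rcases Nat.eq_zero_or_pos lst.length with h | h
    · rw [h]
      simpa [PySem.List.pyRange_one_eq_nil (by omega : ((0:Nat):Int) ≤ 1)] using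
        InvCnt_empty lst (by omega : ((0:Nat):Int) ≤ 1)
    · have hinv := A_loop lst (lst.length - 1) (by omega)
      have he : 1 + ((lst.length - 1 : Nat) : Int) = (lst.length : Int) := by
        have : 1 ≤ lst.length := h
        push_cast [this]; ring
      rwa [he] at hinv
  have hB : InvCnt lst 1 (lst.length : Int)
      ((PySem.List.pyRange ((lst.length : Int) - 1) 0 (-1)).foldl (stepB lst)
        (PySem.Dict.empty, PySem.Dict.empty)).1 := by
    rcases Nat.eq_zero_or_pos lst.length with h | h
    · rw [h]
      simpa [PySem.List.pyRange_neg_one_eq_nil (by omega : ((0:Nat):Int) - 1 ≤ 0)] using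
        InvCnt_empty lst (by omega : ((0:Nat):Int) ≤ 1)
    · have he : ((lst.length : Int) - 1) = ((lst.length - 1 : Nat) : Int) := by
        have : 1 ≤ lst.length := h
        push_cast [this]; ring
      have he2 : ((lst.length - 1 : Nat) : Int) + 1 = (lst.length : Int) := by
        have : 1 ≤ lst.length := h
        push_cast [this]; ring
      rw [he]
      refine B_loop lst (lst.length - 1) _ (by omega) ?_ ?_
      · rw [he2]; exact InvCnt_empty lst (le_refl _)
      · intro x
        rw [he2]
        simp [PySem.List.pyRange_one_eq_nil (le_refl ((lst.length : Int))),
          PySem.Dict.getD_empty]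
  rw [values_any_eq lst _ _ hA hB]
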